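-- pv_equiv track=rewrite | github.com/Michel-A-Gonzalez/Coursework-Python | Data Structures and Algorithms/Python Code/Reducible.py | get_longest_words
-- ===== SOURCE A (Python) =====
-- def get_longest_words (string_list):
--
--     longest = 0
--
--     current_length = 0
--
--     # gets the longest length in the list of
--     # reducible words
--
--     for i in range(0, len(string_list)):
--
--         current_length = len(string_list[i])
--
--         if (current_length > longest):
--
--             longest = current_length
--
--         else:
--
--             continue
--
--     # gets rid of all the strings that are not the longest
--     # reducible words
--
--     j = 0
--
--     while j < len(string_list):
--
--         if(len(string_list[j]) < longest):
--
--             string_list.pop(j)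
--
--         else:
--
--             j += 1
--
--     return string_list
-- ===== SOURCE B (Python) =====
-- def get_longest_words(string_list):
--     best = 0
--     result = []
--     for s in string_list:
--         L = len(s)
--         if L > best:
--             best = L
--             result = [s]
--         elif L == best:
--             result.append(s)
--     string_list[:] = result
--     return string_list
-- ===== Notes on version B (the rewrite author's own statement) =====
-- stated objective: alternative
-- what changed: B collects the longest strings in a single pass (running max with a reset-or-append winner list, written back by slice assignment), replacing A's separate max-finding pass followed by a while-loop that pops shorter strings in place.
import Mathlib
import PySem

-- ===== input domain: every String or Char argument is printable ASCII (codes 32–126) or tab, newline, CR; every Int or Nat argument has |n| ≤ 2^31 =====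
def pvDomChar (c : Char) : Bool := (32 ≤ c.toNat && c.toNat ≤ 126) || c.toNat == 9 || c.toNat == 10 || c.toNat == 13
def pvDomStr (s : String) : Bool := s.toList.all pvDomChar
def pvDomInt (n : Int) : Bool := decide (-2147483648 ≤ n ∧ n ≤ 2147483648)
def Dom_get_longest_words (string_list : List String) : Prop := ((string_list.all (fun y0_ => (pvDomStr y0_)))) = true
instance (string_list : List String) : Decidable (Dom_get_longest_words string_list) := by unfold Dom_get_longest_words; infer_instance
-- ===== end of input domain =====

-- B collects the longest strings in one pass (running max + winner list) instead of A's
-- max-finding pass followed by an in-place pop loop; equivalence of the RETURN value is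
-- proved (in Python, A and B both mutate the argument; the final contents agree).

-- ===== PORT A =====
-- A's while loop: j scans, popping entries shorter than `longest` (index always in range).
def gwWhile (longest : Nat) (j : Nat) (lst : List String) : List String :=
  if h : j < lst.length then
    if (lst.getD j "").length < longest then
      gwWhile longest j (lst.eraseIdx j)
    else
      gwWhile longest (j + 1) lst
  else lst
termination_by lst.length - j
decreasing_by
  · have := List.length_eraseIdx_of_lt (l := lst) (i := j) h; omega
  · omega

def get_longest_words (string_list : List String) : List String :=
  let longest := string_list.foldl (fun longest s => if s.length > longest then s.length else longest) 0
  gwWhile longest 0 string_list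

-- ===== PORT B =====
def get_longest_words_alt (string_list : List String) : List String :=
  (string_list.foldl
    (fun (st : Nat × List String) s =>
      let L := s.length
      if L > st.1 then (L, [s])
      else if L = st.1 then (st.1, st.2 ++ [s])
      else st)
    (0, ([] : List String))).2

-- ===== PRECONDITION & SPEC =====
def Spec_get_longest_words (string_list : List String) (out : List String) : Prop := out = get_longest_words_alt string_list
instance (string_list : List String) (out : List String) : Decidable (Spec_get_longest_words string_list out) := by unfold Spec_get_longest_words; infer_instance

-- ===== CLAIM (what is proved, stated in full; the proofs are below) =====
def Claim_equal_get_longest_words : Prop := ∀ (string_list : List String), Dom_get_longest_words string_list → Spec_get_longest_words string_list (get_longest_words string_list)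

-- ===== LEMMAS AND PROOFS =====

def gwMax (b : Nat) (lst : List String) : Nat :=
  lst.foldl (fun a s => max a s.length) b

theorem gwMax_cons (b : Nat) (s : String) (t : List String) :
    gwMax b (s :: t) = gwMax (max b s.length) t := rfl

theorem le_gwMax (b : Nat) (lst : List String) : b ≤ gwMax b lst := by
  induction lst generalizing b with
  | nil => simp [gwMax]
  | cons s t ih =>
    have := ih (max b s.length)
    rw [gwMax_cons]
    omega

theorem mem_le_gwMax (b : Nat) (lst : List String) (x : String) (hx : x ∈ lst) :
    x.length ≤ gwMax b lst := by
  induction lst generalizing b with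
  | nil => cases hx
  | cons s t ih =>
    rw [gwMax_cons]
    rcases List.mem_cons.mp hx with h | h
    · subst h
      have := le_gwMax (max b x.length) t
      omega
    · exact ih (max b s.length) h

theorem foldA_eq_gwMax (b : Nat) (lst : List String) :
    lst.foldl (fun longest s => if s.length > longest then s.length else longest) b = gwMax b lst := by
  induction lst generalizing b with
  | nil => rfl
  | cons s t ih =>
    rw [gwMax_cons, List.foldl_cons]
    have h : (if s.length > b then s.length else b) = max b s.length := by
      split <;> omega
    rw [h, ih]

theorem gwWhile_eq (longest : Nat) (j : Nat) (lst : List String) :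
    gwWhile longest j lst =
      lst.take j ++ (lst.drop j).filter (fun s => decide (longest ≤ s.length)) := by
  fun_induction gwWhile longest j lst with
  | case1 j lst h hlt ih =>
    rw [ih]
    have hdrop : lst.drop j = lst[j] :: lst.drop (j + 1) := List.drop_eq_getElem_cons h
    have hgd : lst.getD j "" = lst[j] := List.getD_eq_getElem lst "" h
    rw [hgd] at hlt
    rw [List.eraseIdx_eq_take_drop_succ]
    have hlen : (lst.take j).length = j := List.length_take_of_le (by omega)
    rw [List.take_left' hlen, List.drop_left' hlen, hdrop]
    have hdf : (decide (longest ≤ lst[j].length)) = false := by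
      simp; omega
    rw [List.filter_cons, hdf]
    simp
  | case2 j lst h hge ih =>
    rw [ih]
    have hdrop : lst.drop j = lst[j] :: lst.drop (j + 1) := List.drop_eq_getElem_cons h
    have hgd : lst.getD j "" = lst[j] := List.getD_eq_getElem lst "" h
    rw [hgd] at hge
    have htake : lst.take (j + 1) = lst.take j ++ [lst[j]] := by
      rw [List.take_succ]
      simp [List.getElem?_eq_getElem h]
    rw [htake, hdrop]
    have hdt : (decide (longest ≤ lst[j].length)) = true := by
      simp; omega
    rw [List.filter_cons, hdt, if_pos rfl, List.append_assoc]
    rfl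
  | case3 j lst h =>
    have hj : lst.length ≤ j := by omega
    rw [List.drop_eq_nil_of_le hj, List.take_of_length_le hj]
    simp

theorem foldB_eq (lst : List String) (b : Nat) (r : List String) :
    lst.foldl
      (fun (st : Nat × List String) s =>
        let L := s.length
        if L > st.1 then (L, [s])
        else if L = st.1 then (st.1, st.2 ++ [s])
        else st)
      (b, r)
    = (gwMax b lst,
       (if gwMax b lst = b then r else []) ++
         lst.filter (fun s => decide (s.length = gwMax b lst))) := by
  induction lst generalizing b r with
  | nil => simp [gwMax]
  | cons s t ih =>
    rw [List.foldl_cons]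
    by_cases h1 : s.length > b
    · simp only [h1, if_pos]
      rw [ih]
      have hm : gwMax b (s :: t) = gwMax s.length t := by
        rw [gwMax_cons]; congr 1; omega
      have hle : s.length ≤ gwMax s.length t := le_gwMax _ _
      have hne : gwMax b (s :: t) ≠ b := by rw [hm]; omega
      rw [hm]
      have hnb : s.length ≠ b := by omega
      have hnb2 : gwMax s.length t ≠ b := by omega
      by_cases h2 : gwMax s.length t = s.length
      · simp [h2, hnb]
      · have hdf : (decide (s.length = gwMax s.length t)) = false := by simp; omega
        simp [h2, hdf, hnb2]
    · have hm : gwMax b (s :: t) = gwMax b t := by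
        rw [gwMax_cons]; congr 1; omega
      have hble : b ≤ gwMax b t := le_gwMax _ _
      by_cases h2 : s.length = b
      · simp only [h1, if_neg, h2, if_pos, not_false_iff]
        rw [ih, hm]
        by_cases h3 : gwMax b t = b
        · have hdt : (decide (s.length = gwMax b t)) = true := by simp; omega
          simp [h3, hdt, h2]
        · have hdf : (decide (s.length = gwMax b t)) = false := by simp; omega
          simp [h3, hdf]
      · simp only [h1, if_neg, h2, if_neg, not_false_iff]
        rw [ih, hm]
        have hlt : s.length < b := by omega
        have : (decide (s.length = gwMax b t)) = false := by simp; omega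
        simp [this]

-- ===== VERDICT (by name: the statement is the Claim_ definition above) =====
theorem get_longest_words_spec : Claim_equal_get_longest_words := by
  intro lst _
  show get_longest_words lst = get_longest_words_alt lst
  unfold get_longest_words get_longest_words_alt
  rw [foldA_eq_gwMax, gwWhile_eq, foldB_eq]
  simp only [List.take_zero, List.drop_zero, List.nil_append]
  have hsplit : (if gwMax 0 lst = 0 then ([] : List String) else []) = [] := by
    split <;> rfl
  rw [hsplit, List.nil_append]
  apply List.filter_congr
  intro x hx
  have := mem_le_gwMax 0 lst x hx
  simp
  omega
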